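-- pv_equiv track=rewrite | github.com/amitadate/EECS-337-NLP-Project-02 | Final_Submission/data_extractor.py | ingredients_extracter
-- ===== SOURCE A (Python) =====
-- def is_number(item):
--     try:
--         float(item)
--     except ValueError:
--         return False
--     return True
--
-- def is_fraction(s):
--     values = s.split('/')
--     return len(values) == 2 and all(i.isdigit() for i in values)
--
-- def ingredients_extracter(ingredient_raw_dict, descriptor, units):
--     ingredients ={}
--     ingredient_list_raw = ingredient_raw_dict['ingredients']
--     count=1
--     for string in ingredient_list_raw:
--         for word in string.split():
--             word = word.replace('(', '')
--             word = word.replace(')', '')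
--             word = word.replace(',', '')
--             word = word.lower()
--             if is_number(word) or is_fraction(word):
--                 if ('quantity ' + str(count)) in ingredients:
--                     ingredients['quantity '+ str(count)] = ingredients['quantity '+ str(count)] + ',' + word
--                 else:
--                     ingredients['quantity '+ str(count)] =  word
--
--             elif word in units:
--                 if ('measurement ' + str(count)) in ingredients:
--                     ingredients['measurement '+ str(count)] = ingredients['measurement '+ str(count)] + ',' + word
--                 else:
--                     ingredients['measurement '+ str(count)] =  word
--
--             elif word in descriptor:
--                 if ('descriptor ' + str(count)) in ingredients:
--                     ingredients['descriptor '+ str(count)] = ingredients['descriptor '+ str(count)] + ',' + word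
--                 else:
--                     ingredients['descriptor '+ str(count)] =  word
--             else:
--                 if ('ingredient ' + str(count)) in ingredients:
--                     ingredients['ingredient ' + str(count)] = ingredients['ingredient ' + str(count)] +' ' + word
--                 else:
--                     ingredients['ingredient ' + str(count)] =word
--         count+=1
--     return ingredients
-- ===== SOURCE B (Python) =====
-- def is_number(item):
--     try:
--         float(item)
--     except ValueError:
--         return False
--     return True
--
-- def is_fraction(s):
--     values = s.split('/')
--     return len(values) == 2 and all(i.isdigit() for i in values)
--
-- def _classify(word, descriptor, units):
--     if is_number(word) or is_fraction(word):
--         return 'quantity'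
--     elif word in units:
--         return 'measurement'
--     elif word in descriptor:
--         return 'descriptor'
--     return 'ingredient'
--
-- def ingredients_extracter(ingredient_raw_dict, descriptor, units):
--     pairs = []
--     for count, string in enumerate(ingredient_raw_dict['ingredients'], 1):
--         tagged = []
--         for w in string.split():
--             w = w.replace('(', '').replace(')', '').replace(',', '').lower()
--             tagged.append((w, _classify(w, descriptor, units)))
--         while tagged:
--             cat = tagged[0][1]
--             sep = ' ' if cat == 'ingredient' else ','
--             pairs.append((cat + ' ' + str(count),
--                           sep.join(w for w, c in tagged if c == cat)))
--             tagged = [(w, c) for w, c in tagged if c != cat]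
--     return dict(pairs)
-- ===== Notes on version B (the rewrite author's own statement) =====
-- stated objective: alternative
-- what changed: A threads a growing dict through every word, testing per word whether the '<category> <count>' key already exists and concatenating onto its value; B tags each cleaned word with its category once, then emits the flat key/value pair list by recursively partitioning the tagged words (take the first word's category, join all its words, recurse on the rest) and builds the dict from that list at the end.
import Mathlib
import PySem

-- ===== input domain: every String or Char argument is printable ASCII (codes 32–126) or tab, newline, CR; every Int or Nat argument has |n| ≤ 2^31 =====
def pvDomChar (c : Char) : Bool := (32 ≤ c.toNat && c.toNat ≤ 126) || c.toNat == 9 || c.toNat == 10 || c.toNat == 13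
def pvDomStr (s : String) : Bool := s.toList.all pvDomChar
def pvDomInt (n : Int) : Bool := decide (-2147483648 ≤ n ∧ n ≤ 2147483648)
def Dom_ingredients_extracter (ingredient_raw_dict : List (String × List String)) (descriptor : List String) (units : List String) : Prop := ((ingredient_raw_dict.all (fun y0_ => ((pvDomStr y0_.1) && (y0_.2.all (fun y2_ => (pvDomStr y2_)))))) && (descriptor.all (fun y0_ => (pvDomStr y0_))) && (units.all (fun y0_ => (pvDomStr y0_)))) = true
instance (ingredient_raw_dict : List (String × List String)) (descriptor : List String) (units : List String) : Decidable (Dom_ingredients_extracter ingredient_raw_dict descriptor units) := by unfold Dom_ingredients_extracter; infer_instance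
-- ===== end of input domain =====

-- B replaces A's per-word dict bookkeeping (membership test + first-write/append per key)
-- by tagging each cleaned word with its category and recursively partitioning the tagged
-- list into one joined entry per category; objective: alternative decomposition, same cost class.

-- ===== shared module-level helpers (is_number / is_fraction and the word clean-up,
-- identical source lines in Source A and Source B) =====

-- Python whitespace stripped/accepted by float(); exact on the Dom alphabet
def pvWsChar (c : Char) : Bool := c = ' ' || c = '\t' || c = '\n' || c = '\r'

def pvWsOnly (l : List Char) : Bool := l.all pvWsChar

-- rest of a Python float 'digitpart' after its first digit: ('_'? digit)*
def pvDigitsRest : List Char → List Char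
  | '_' :: c :: r => if c.isDigit then pvDigitsRest r else '_' :: c :: r
  | c :: r => if c.isDigit then pvDigitsRest r else c :: r
  | [] => []

-- consume a Python float 'digitpart' (digit ('_'? digit)*); none if no leading digit
def pvDigits? : List Char → Option (List Char)
  | c :: r => if c.isDigit then some (pvDigitsRest r) else none
  | [] => none

-- 'inf' / 'infinity' / 'nan' followed by whitespace only (input is already lowercased)
def pvNamed : List Char → Bool
  | 'i' :: 'n' :: 'f' :: 'i' :: 'n' :: 'i' :: 't' :: 'y' :: r => pvWsOnly r
  | 'i' :: 'n' :: 'f' :: r => pvWsOnly r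
  | 'n' :: 'a' :: 'n' :: r => pvWsOnly r
  | _ => false

-- optional exponent part ('e' [sign] digitpart) then trailing whitespace
def pvExpPart : List Char → Bool
  | 'e' :: r =>
    (match (match r with
            | c :: t => if c = '+' ∨ c = '-' then t else c :: t
            | [] => []) with
     | r2 => (match pvDigits? r2 with
              | some r3 => pvWsOnly r3
              | none => false))
  | r => pvWsOnly r

-- the grammar CPython's float() accepts (hand port, exact on lowercased ASCII strings:
-- ws, sign, inf/infinity/nan or digitpart [. [digitpart]] [exp], ws; '_' only between digits)
def pvIsFloat (l : List Char) : Bool :=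
  let l1 := l.dropWhile pvWsChar
  let l2 := match l1 with
    | c :: r => if c = '+' ∨ c = '-' then r else c :: r
    | [] => []
  if pvNamed l2 then true
  else
    match pvDigits? l2 with
    | some r =>
      (match r with
       | '.' :: r2 =>
         (match pvDigits? r2 with
          | some r3 => pvExpPart r3
          | none => pvExpPart r2)
       | _ => pvExpPart r)
    | none =>
      (match l2 with
       | '.' :: r2 =>
         (match pvDigits? r2 with
          | some r3 => pvExpPart r3
          | none => false)
       | _ => false)

-- is_number(item) = "float(item) does not raise ValueError"
def pvIsNumber (s : String) : Bool := pvIsFloat s.toList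

-- is_fraction(s)
def pvIsFraction (s : String) : Bool :=
  match PySem.Str.split? s "/" with
  | some values => values.length == 2 && values.all PySem.Str.strIsdigit
  | none => false

-- word.replace('(','').replace(')','').replace(',','').lower()
def pvClean (w : String) : String :=
  PySem.Str.lower (PySem.Str.replace (PySem.Str.replace (PySem.Str.replace w "(" "") ")" "") "," "")

-- ===== PORT A =====

-- the body of A's inner 'for word in string.split()' loop
def pvStepA (descriptor units : List String) (count : Int)
    (ingredients : PySem.Dict String String) (word0 : String) : PySem.Dict String String :=
  let word := pvClean word0
  if pvIsNumber word || pvIsFraction word then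
    if ingredients.contains ("quantity " ++ PySem.Int.toStr count) then
      ingredients.insert ("quantity " ++ PySem.Int.toStr count)
        (ingredients.getD ("quantity " ++ PySem.Int.toStr count) "" ++ "," ++ word)
    else ingredients.insert ("quantity " ++ PySem.Int.toStr count) word
  else if units.contains word then
    if ingredients.contains ("measurement " ++ PySem.Int.toStr count) then
      ingredients.insert ("measurement " ++ PySem.Int.toStr count)
        (ingredients.getD ("measurement " ++ PySem.Int.toStr count) "" ++ "," ++ word)
    else ingredients.insert ("measurement " ++ PySem.Int.toStr count) word
  else if descriptor.contains word then
    if ingredients.contains ("descriptor " ++ PySem.Int.toStr count) then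
      ingredients.insert ("descriptor " ++ PySem.Int.toStr count)
        (ingredients.getD ("descriptor " ++ PySem.Int.toStr count) "" ++ "," ++ word)
    else ingredients.insert ("descriptor " ++ PySem.Int.toStr count) word
  else
    if ingredients.contains ("ingredient " ++ PySem.Int.toStr count) then
      ingredients.insert ("ingredient " ++ PySem.Int.toStr count)
        (ingredients.getD ("ingredient " ++ PySem.Int.toStr count) "" ++ " " ++ word)
    else ingredients.insert ("ingredient " ++ PySem.Int.toStr count) word

def ingredients_extracter (ingredient_raw_dict : List (String × List String)) (descriptor : List String) (units : List String) : List (String × String) :=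
  match ingredient_raw_dict.find? (fun p => p.1 == "ingredients") with
  | none => []   -- Python raises KeyError here; excluded by Pre_
  | some pr =>
    (pr.2.foldl
      (fun (st : PySem.Dict String String × Int) s =>
        ((PySem.Str.split₀ s).foldl (pvStepA descriptor units st.2) st.1, st.2 + 1))
      (PySem.Dict.empty, 1)).1.items

-- ===== PORT B =====

-- _classify(word, descriptor, units)
def pvCat (descriptor units : List String) (word : String) : String :=
  if pvIsNumber word || pvIsFraction word then "quantity"
  else if units.contains word then "measurement"
  else if descriptor.contains word then "descriptor"
  else "ingredient"

-- Source B's 'while tagged:' loop: peel off the first word's category, join its words, recurse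
def pvGroup (count : Int) : List (String × String) → List (String × String)
  | [] => []
  | (w, cat) :: rest =>
    (cat ++ " " ++ PySem.Int.toStr count,
     PySem.Str.join (if cat == "ingredient" then " " else ",")
       ((((w, cat) :: rest).filter (fun wc => wc.2 == cat)).map (·.1)))
    :: pvGroup count (rest.filter (fun wc => !(wc.2 == cat)))
termination_by l => l.length
decreasing_by simpa using Nat.lt_succ_of_le (le_trans (List.length_filter_le _ rest.attach) (by simp))

def ingredients_extracter_alt (ingredient_raw_dict : List (String × List String)) (descriptor : List String) (units : List String) : List (String × String) :=
  match ingredient_raw_dict.find? (fun p => p.1 == "ingredients") with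
  | none => []   -- Python raises KeyError here; excluded by Pre_
  | some pr =>
    let pairs := (PySem.List.enumerate pr.2 1).flatMap
      (fun p => pvGroup p.1
        ((PySem.Str.split₀ p.2).map (fun w0 =>
          let w := pvClean w0; (w, pvCat descriptor units w))))
    (pairs.foldl (fun d q => d.insert q.1 q.2) PySem.Dict.empty).items

-- ===== PRECONDITION & SPEC =====

-- Python A raises KeyError unless the dict has the key 'ingredients' (first-match lookup)
def Pre_ingredients_extracter (ingredient_raw_dict : List (String × List String)) (descriptor : List String) (units : List String) : Prop :=
  "ingredients" ∈ ingredient_raw_dict.map Prod.fst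

instance (ingredient_raw_dict : List (String × List String)) (descriptor : List String) (units : List String) : Decidable (Pre_ingredients_extracter ingredient_raw_dict descriptor units) := by unfold Pre_ingredients_extracter; infer_instance

def pvWitness_ingredients_extracter : (List (String × List String)) × List String × List String :=
  ([("ingredients", ["2 cups fresh flour", "1/2 tsp salt, (fine)"])], ["fresh", "fine"], ["cups", "tsp"])

def Spec_ingredients_extracter (ingredient_raw_dict : List (String × List String)) (descriptor : List String) (units : List String) (out : List (String × String)) : Prop := out = ingredients_extracter_alt ingredient_raw_dict descriptor units
instance (ingredient_raw_dict : List (String × List String)) (descriptor : List String) (units : List String) (out : List (String × String)) : Decidable (Spec_ingredients_extracter ingredient_raw_dict descriptor units out) := by unfold Spec_ingredients_extracter; infer_instance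

-- ===== CLAIM (what is proved, stated in full; the proofs are below) =====
def Claim_equal_ingredients_extracter : Prop := ∀ (ingredient_raw_dict : List (String × List String)) (descriptor : List String) (units : List String), Dom_ingredients_extracter ingredient_raw_dict descriptor units → Pre_ingredients_extracter ingredient_raw_dict descriptor units → Spec_ingredients_extracter ingredient_raw_dict descriptor units (ingredients_extracter ingredient_raw_dict descriptor units)

-- ===== LEMMAS AND PROOFS =====

-- the four category names, and the key/separator A builds per category
def pvCats4 : List String := ["quantity", "measurement", "descriptor", "ingredient"]

def pvKey (c : String) (n : Int) : String := c ++ " " ++ PySem.Int.toStr n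

def pvSep (c : String) : String := if c == "ingredient" then " " else ","

def pvEntry (descriptor units : List String) (n : Int) (ws : List String) (c : String) : String × String :=
  (pvKey c n, PySem.Str.join (pvSep c) (ws.filter (fun w => pvCat descriptor units w == c)))

-- A's per-word step, refactored through the category of the word
def pvGenStep (descriptor units : List String) (n : Int)
    (d : PySem.Dict String String) (w : String) : PySem.Dict String String :=
  let c := pvCat descriptor units w
  let k := pvKey c n
  if d.contains k then d.insert k (d.getD k "" ++ pvSep c ++ w) else d.insert k w

theorem pvCat_mem_cats4 (ds us : List String) (w : String) : pvCat ds us w ∈ pvCats4 := by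
  unfold pvCat pvCats4; split_ifs <;> simp

theorem pvStepA_eq (ds us : List String) (n : Int) (d : PySem.Dict String String) (w0 : String) :
    pvStepA ds us n d w0 = pvGenStep ds us n d (pvClean w0) := by
  simp only [pvStepA, pvGenStep, pvCat, pvKey, pvSep]
  by_cases h1 : (pvIsNumber (pvClean w0) || pvIsFraction (pvClean w0)) = true
  · simp only [h1, if_true, show ("quantity":String) ++ " " = "quantity " from rfl,
      show (("quantity":String) == "ingredient") = false from rfl, Bool.false_eq_true, if_false]
  · simp only [Bool.not_eq_true] at *
    simp only [h1, Bool.false_eq_true, if_false]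
    by_cases h2 : us.contains (pvClean w0) = true
    · simp only [h2, if_true, show ("measurement":String) ++ " " = "measurement " from rfl,
        show (("measurement":String) == "ingredient") = false from rfl, Bool.false_eq_true, if_false]
    · simp only [Bool.not_eq_true] at *
      simp only [h2, Bool.false_eq_true, if_false]
      by_cases h3 : ds.contains (pvClean w0) = true
      · simp only [h3, if_true, show ("descriptor":String) ++ " " = "descriptor " from rfl,
        show (("descriptor":String) == "ingredient") = false from rfl, Bool.false_eq_true, if_false]
      · simp only [Bool.not_eq_true] at *
        simp only [h3, Bool.false_eq_true, if_false,
          show ("ingredient":String) ++ " " = "ingredient " from rfl,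
          show (("ingredient":String) == "ingredient") = true from rfl, if_true]

-- str(a) = str(b) → a = b for positive ints
theorem pvToDigitsCore_eq (n : ℕ) (hn : 0 < n) : ∀ (f : ℕ) (acc : List Char), n < f →
    Nat.toDigitsCore 10 f n acc = ((Nat.digits 10 n).map Nat.digitChar).reverse ++ acc := by
  induction n using Nat.strong_induction_on with
  | _ n ih =>
    intro f acc hf
    match f with
    | f' + 1 =>
      rw [Nat.digits_def' (by norm_num : 1 < 10) hn]
      simp only [Nat.toDigitsCore, List.map_cons, List.reverse_cons]
      by_cases h0 : n / 10 = 0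
      · simp [h0, Nat.digits_zero]
      · have hlt : n / 10 < n := Nat.div_lt_self hn (by norm_num)
        rw [if_neg h0, ih (n / 10) hlt (Nat.pos_of_ne_zero h0) f' _ (by omega)]
        simp

theorem pvDigitChar_inj : ∀ a < 10, ∀ b < 10, Nat.digitChar a = Nat.digitChar b → a = b := by decide

theorem pvDigitCharList_inj : ∀ (l1 l2 : List ℕ), (∀ x ∈ l1, x < 10) → (∀ x ∈ l2, x < 10) →
    l1.map Nat.digitChar = l2.map Nat.digitChar → l1 = l2 := by
  intro l1
  induction l1 with
  | nil => intro l2 _ _ h; cases l2 <;> simp_all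
  | cons a t ih =>
    intro l2 h1 h2 h
    cases l2 with
    | nil => simp_all
    | cons b t2 =>
      simp only [List.map_cons, List.cons.injEq] at h
      have hab : a = b := pvDigitChar_inj a (h1 a (by simp)) b (h2 b (by simp)) h.1
      subst hab
      exact congrArg _ (ih t2 (fun x hx => h1 x (by simp [hx])) (fun x hx => h2 x (by simp [hx])) h.2)

theorem pvToDigits10_inj {a b : ℕ} (ha : 0 < a) (hb : 0 < b)
    (h : Nat.toDigits 10 a = Nat.toDigits 10 b) : a = b := by
  unfold Nat.toDigits at h
  rw [pvToDigitsCore_eq a ha _ [] (by omega), pvToDigitsCore_eq b hb _ [] (by omega)] at h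
  simp only [List.append_nil, List.reverse_inj] at h
  have := pvDigitCharList_inj _ _ (fun x hx => Nat.digits_lt_base (by norm_num) hx)
    (fun x hx => Nat.digits_lt_base (by norm_num) hx) h
  calc a = Nat.ofDigits 10 (Nat.digits 10 a) := (Nat.ofDigits_digits 10 a).symm
    _ = Nat.ofDigits 10 (Nat.digits 10 b) := by rw [this]
    _ = b := Nat.ofDigits_digits 10 b

theorem pvToStr_inj {a b : Int} (ha : 1 ≤ a) (hb : 1 ≤ b)
    (h : PySem.Int.toStr a = PySem.Int.toStr b) : a = b := by
  have h' : (PySem.Int.toStr a).toList = (PySem.Int.toStr b).toList := by rw [h]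
  rw [PySem.Int.toList_toStr, PySem.Int.toList_toStr] at h'
  unfold PySem.Int.toChars at h'
  rw [if_neg (by omega), if_neg (by omega)] at h'
  have := pvToDigits10_inj (a := a.toNat) (b := b.toNat) (by omega) (by omega) h'
  omega

-- keys built from the four category names decompose uniquely
theorem pvKey_inj {c1 c2 : String} (h1 : c1 ∈ pvCats4) (h2 : c2 ∈ pvCats4)
    {t1 t2 : Int} (h : pvKey c1 t1 = pvKey c2 t2) :
    c1 = c2 ∧ PySem.Int.toStr t1 = PySem.Int.toStr t2 := by
  simp only [pvCats4, List.mem_cons, List.not_mem_nil, or_false] at h1 h2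
  have h' : (pvKey c1 t1).toList = (pvKey c2 t2).toList := by rw [h]
  simp only [pvKey, String.toList_append] at h'
  rcases h1 with rfl | rfl | rfl | rfl <;> rcases h2 with rfl | rfl | rfl | rfl <;>
    simp_all <;> exact String.toList_inj.mp (by simpa using h')

-- filtering the tagged list on a category and projecting = filtering the words
theorem pvTagFilter (ws : List String) (f : String → String) (c : String) :
    (((ws.map (fun w => (w, f w))).filter (fun wc => wc.2 == c)).map (·.1))
      = ws.filter (fun w => f w == c) := by
  induction ws with
  | nil => rfl
  | cons a t ih =>
    simp only [List.map_cons, List.filter_cons]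
    by_cases hc : (f a == c) = true
    · simp [hc, ih]
    · simp only [Bool.not_eq_true] at hc
      simp [hc, ih]

-- appending one more piece to a non-empty join
theorem pvJoin_single (sep x : String) : PySem.Str.join sep [x] = x := by
  apply String.toList_inj.mp
  rw [PySem.Str.toList_join]
  simp [PySem.Chars.join_singleton]

theorem pvChars_join_append (sep : List Char) (xs : List (List Char)) (x : List Char) (h : xs ≠ []) :
    PySem.Chars.join sep (xs ++ [x]) = PySem.Chars.join sep xs ++ sep ++ x := by
  induction xs with
  | nil => simp at h
  | cons a t ih =>
    cases t with
    | nil => simp [PySem.Chars.join_cons_cons, PySem.Chars.join_singleton]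
    | cons b t2 =>
      have : (a :: b :: t2) ++ [x] = a :: b :: (t2 ++ [x]) := by simp
      rw [this, PySem.Chars.join_cons_cons, show b :: (t2 ++ [x]) = (b :: t2) ++ [x] by simp,
        ih (by simp), PySem.Chars.join_cons_cons]
      simp [List.append_assoc]

theorem pvJoin_append (sep : String) (xs : List String) (x : String) (h : xs ≠ []) :
    PySem.Str.join sep (xs ++ [x]) = PySem.Str.join sep xs ++ sep ++ x := by
  apply String.toList_inj.mp
  simp only [PySem.Str.toList_join, String.toList_append, List.map_append, List.map_cons, List.map_nil]
  exact pvChars_join_append _ _ _ (by simpa using h)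

-- A's inner word loop appends exactly one entry per category, in first-appearance order
theorem pvFoldG_items (ds us : List String) (n : Int) (ws : List String)
    (d : PySem.Dict String String) (hnd : d.keys.Nodup)
    (hfresh : ∀ c ∈ pvCats4, pvKey c n ∉ d.keys) :
    (ws.foldl (pvGenStep ds us n) d).items
      = d.items ++ (PySem.List.dedup (ws.map (pvCat ds us))).map (pvEntry ds us n ws) := by
  induction ws using List.reverseRecOn with
  | nil =>
    simp [PySem.List.dedup_eq_ofList, PySem.Set.ofList_nil]
  | append_singleton l w ih =>
    rw [List.foldl_append, List.foldl_cons, List.foldl_nil]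
    set D := l.foldl (pvGenStep ds us n) d with hD
    set c := pvCat ds us w with hc
    have hccats : c ∈ pvCats4 := pvCat_mem_cats4 ds us w
    have hkeys : D.keys
        = d.keys ++ (PySem.List.dedup (l.map (pvCat ds us))).map (fun c' => pvKey c' n) := by
      simp only [PySem.Dict.keys, ih, List.map_append, List.map_map]
      rfl
    have hmemcats : ∀ c' ∈ PySem.List.dedup (l.map (pvCat ds us)), c' ∈ pvCats4 := by
      intro c' hc'
      rw [PySem.List.dedup_eq_ofList] at hc'
      rcases List.mem_map.mp ((PySem.Set.mem_ofList _ _).mp hc') with ⟨w', _, rfl⟩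
      exact pvCat_mem_cats4 ds us w'
    have hDnodup : D.keys.Nodup := by
      rw [hkeys]
      refine List.Nodup.append hnd ?_ ?_
      · refine List.Nodup.map_on ?_ ?_
        · intro x hx y hy hxy
          exact (pvKey_inj (hmemcats x hx) (hmemcats y hy) hxy).1
        · rw [PySem.List.dedup_eq_ofList]; exact PySem.Set.nodup_ofList _
      · intro a ha hb
        rcases List.mem_map.mp hb with ⟨c', hc', rfl⟩
        exact hfresh c' (hmemcats c' hc') ha
    have hcats : (l ++ [w]).map (pvCat ds us) = l.map (pvCat ds us) ++ [c] := by
      simp [hc]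
    by_cases hmem : c ∈ l.map (pvCat ds us)
    · -- the key for c already exists: A overwrites in place, the entry's join grows
      have hcdedup : c ∈ PySem.List.dedup (l.map (pvCat ds us)) := by
        rw [PySem.List.dedup_eq_ofList]; exact (PySem.Set.mem_ofList _ _).mpr hmem
      have hflne : l.filter (fun w' => pvCat ds us w' == c) ≠ [] := by
        rcases List.mem_map.mp hmem with ⟨w', hw', hcw'⟩
        exact List.ne_nil_of_mem
          (List.mem_filter.mpr ⟨hw', by simp [hcw']⟩)
      have hpair : (pvKey c n,
          PySem.Str.join (pvSep c) (l.filter (fun w' => pvCat ds us w' == c))) ∈ D.items := by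
        rw [ih]
        exact List.mem_append_right _ (List.mem_map.mpr ⟨c, hcdedup, rfl⟩)
      have hcont : D.contains (pvKey c n) = true := by
        rw [PySem.Dict.contains_iff_mem_keys, hkeys]
        exact List.mem_append_right _ (List.mem_map.mpr ⟨c, hcdedup, rfl⟩)
      have hgetD : D.getD (pvKey c n) ""
          = PySem.Str.join (pvSep c) (l.filter (fun w' => pvCat ds us w' == c)) :=
        PySem.Dict.getD_of_mem_items D hpair hDnodup ""
      simp only [pvGenStep, ← hc, hcont, if_true]
      rw [PySem.Dict.items_insert_of_contains _ _ hcont, ih, List.map_append]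
      have hdpart : List.map
          (fun p => if (p.1 == pvKey c n) = true then (pvKey c n, D.getD (pvKey c n) "" ++ pvSep c ++ w) else p)
          d.items = d.items := by
        rw [List.map_congr_left (g := id), List.map_id]
        intro p hp
        have hkne : p.1 ≠ pvKey c n := by
          intro he
          exact hfresh c hccats (he ▸ PySem.Dict.mem_keys_of_mem_items d hp)
        simp [beq_eq_false_iff_ne.mpr hkne]
      rw [hdpart, hcats,
        PySem.List.dedup_eq_ofList (List.map (pvCat ds us) l ++ [c]),
        PySem.Set.ofList_append_singleton,
        PySem.Set.add_of_mem ((PySem.Set.mem_ofList _ _).mpr hmem),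
        ← PySem.List.dedup_eq_ofList, List.map_map, List.append_cancel_left_eq]
      refine List.map_congr_left ?_
      intro c' hc'
      by_cases hcc : c' = c
      · simp only [Function.comp_apply, pvEntry, hcc, beq_self_eq_true, if_true]
        rw [hgetD, List.filter_append]
        have hw1 : [w].filter (fun w' => pvCat ds us w' == c) = [w] := by
          simp [← hc]
        rw [hw1, pvJoin_append _ _ _ hflne]
      · have hkne : (pvKey c' n == pvKey c n) = false := by
          refine beq_eq_false_iff_ne.mpr ?_
          intro he
          exact hcc (pvKey_inj (hmemcats c' hc') hccats he).1
        simp only [Function.comp_apply, pvEntry, hkne, Bool.false_eq_true, if_false]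
        rw [List.filter_append]
        have : [w].filter (fun w' => pvCat ds us w' == c') = [] := by
          simp [← hc, Ne.symm hcc]
        rw [this, List.append_nil]
    · -- first word of category c in this string: A appends a fresh key
      have hcnd : c ∉ PySem.List.dedup (l.map (pvCat ds us)) := by
        rw [PySem.List.dedup_eq_ofList]
        exact fun hmm => hmem ((PySem.Set.mem_ofList _ _).mp hmm)
      have hcont : D.contains (pvKey c n) = false := by
        rw [← Bool.not_eq_true, PySem.Dict.contains_iff_mem_keys, hkeys]
        intro hmm
        rcases List.mem_append.mp hmm with hmm | hmm
        · exact hfresh c hccats hmm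
        · rcases List.mem_map.mp hmm with ⟨c', hc', he⟩
          exact hcnd ((pvKey_inj (hmemcats c' hc') hccats he).1 ▸ hc')
      simp only [pvGenStep, ← hc, hcont, Bool.false_eq_true, if_false]
      rw [PySem.Dict.items_insert_of_not_contains _ _ hcont, ih, hcats,
        PySem.List.dedup_eq_ofList (List.map (pvCat ds us) l ++ [c]),
        PySem.Set.ofList_append_singleton,
        PySem.Set.add_of_not_mem (fun hmm => hmem ((PySem.Set.mem_ofList _ _).mp hmm)),
        ← PySem.List.dedup_eq_ofList, List.map_append, List.append_assoc,
        List.append_cancel_left_eq]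
      have hfilnil : l.filter (fun w' => pvCat ds us w' == c) = [] := by
        rw [List.filter_eq_nil_iff]
        intro w' hw' hbe
        exact hmem (List.mem_map.mpr ⟨w', hw', eq_of_beq hbe⟩)
      have hmap : (PySem.List.dedup (l.map (pvCat ds us))).map (pvEntry ds us n (l ++ [w]))
          = (PySem.List.dedup (l.map (pvCat ds us))).map (pvEntry ds us n l) := by
        refine List.map_congr_left ?_
        intro c' hc'
        have hcc : c' ≠ c := fun he => hcnd (he ▸ hc')
        simp only [pvEntry]
        rw [List.filter_append]
        have : [w].filter (fun w' => pvCat ds us w' == c') = [] := by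
          simp [← hc, Ne.symm hcc]
        rw [this, List.append_nil]
      rw [hmap, List.append_cancel_left_eq]
      simp only [List.map_cons, List.map_nil, pvEntry]
      rw [List.filter_append, hfilnil, List.nil_append]
      have : [w].filter (fun w' => pvCat ds us w' == c) = [w] := by simp [← hc]
      rw [this, pvJoin_single]

-- set.discard is a filter, and Python's ordered dedup commutes with filtering
theorem pvDiscard_eq (s : List String) (c : String) :
    PySem.Set.discard s c = s.filter (fun x => !(x == c)) := rfl

theorem pvOfList_filter (p : String → Bool) (l : List String) :
    PySem.Set.ofList (l.filter p) = (PySem.Set.ofList l).filter p := by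
  induction l with
  | nil => rfl
  | cons a t ih =>
    rw [List.filter_cons, PySem.Set.ofList_cons, pvDiscard_eq]
    by_cases hp : p a = true
    · rw [if_pos hp, PySem.Set.ofList_cons, pvDiscard_eq, ih,
        List.filter_cons, if_pos hp, List.filter_filter, List.filter_filter]
      congr 1
      exact List.filter_congr (fun x _ => by rw [Bool.and_comm])
    · rw [if_neg hp, ih]
      simp only [Bool.not_eq_true] at hp
      rw [List.filter_cons, if_neg (by simp [hp]), List.filter_filter]
      refine (List.filter_congr (fun x _ => ?_)).symm
      by_cases hx : (x == a) = true
      · rw [eq_of_beq hx, hp]; simp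
      · simp [hx]

-- dedup peels its head: first occurrence kept, later occurrences filtered out
theorem pvDedup_cons (c : String) (l : List String) :
    PySem.List.dedup (c :: l) = c :: PySem.List.dedup (l.filter (fun x => !(x == c))) := by
  rw [PySem.List.dedup_eq_ofList, PySem.List.dedup_eq_ofList, PySem.Set.ofList_cons,
    pvDiscard_eq, pvOfList_filter]

-- B's recursive partition computes exactly the dedup-indexed entry list
theorem pvGroup_eq (ds us : List String) (n : Int) (ws : List String) :
    pvGroup n (ws.map (fun w => (w, pvCat ds us w)))
      = (PySem.List.dedup (ws.map (pvCat ds us))).map (pvEntry ds us n ws) := by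
  suffices H : ∀ (k : Nat) (ws : List String), ws.length = k →
      pvGroup n (ws.map (fun w => (w, pvCat ds us w)))
        = (PySem.List.dedup (ws.map (pvCat ds us))).map (pvEntry ds us n ws) from
    H ws.length ws rfl
  intro k
  induction k using Nat.strong_induction_on with
  | _ k ih =>
    intro ws hlen
    cases ws with
    | nil => simp [pvGroup, PySem.List.dedup_eq_ofList, PySem.Set.ofList_nil]
    | cons w rest =>
      set c := pvCat ds us w with hc
      set q : String → Bool := fun x => !(pvCat ds us x == c) with hq
      have hfm : (rest.map (fun w' => (w', pvCat ds us w'))).filter (fun wc => !(wc.2 == c))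
          = (rest.filter q).map (fun w' => (w', pvCat ds us w')) := List.filter_map
      have hlen' : (rest.filter q).length < k := by
        have := List.length_filter_le q rest
        simp only [List.length_cons] at hlen
        omega
      have hih := ih _ hlen' (rest.filter q) rfl
      rw [List.map_cons, pvGroup, hfm, hih]
      rw [List.map_cons, ← hc, pvDedup_cons, List.map_cons]
      have hfm2 : (rest.map (pvCat ds us)).filter (fun x => !(x == c))
          = (rest.filter q).map (pvCat ds us) := List.filter_map
      rw [hfm2]
      congr 1
      · -- head entry
        unfold pvEntry pvKey pvSep
        have : ((w, c) :: rest.map (fun w' => (w', pvCat ds us w')))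
            = (w :: rest).map (fun w' => (w', pvCat ds us w')) := by simp [hc]
        rw [this, pvTagFilter (w :: rest) (pvCat ds us) c]
      · -- tail entries: c' ≠ c, so the head word and the q-filter are invisible
        refine List.map_congr_left ?_
        intro c' hc'
        have hne : c' ≠ c := by
          rw [PySem.List.dedup_eq_ofList] at hc'
          rcases List.mem_map.mp ((PySem.Set.mem_ofList _ _).mp hc') with ⟨x, hx, rfl⟩
          have := (List.mem_filter.mp hx).2
          rw [hq] at this
          simpa using this
        unfold pvEntry
        congr 1
        rw [List.filter_cons, if_neg (by simp [← hc]; exact fun he => hne he.symm),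
          List.filter_filter]
        refine congrArg _ (List.filter_congr (fun x _ => ?_))
        by_cases hx : (pvCat ds us x == c') = true
        · have h2 : (pvCat ds us x == c) = false :=
            beq_eq_false_iff_ne.mpr (by rw [eq_of_beq hx]; exact hne)
          simp [hq, hx, h2]
        · simp only [Bool.not_eq_true] at hx
          simp [hx]

-- the per-string entry chunk (shared shape of both sides' flattened output)
def pvChunk (ds us : List String) (p : Int × String) : List (String × String) :=
  (PySem.List.dedup (((PySem.Str.split₀ p.2).map pvClean).map (pvCat ds us))).map
    (pvEntry ds us p.1 ((PySem.Str.split₀ p.2).map pvClean))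

theorem pvChunk_cats (ds us : List String) (p : Int × String) :
    ∀ c' ∈ PySem.List.dedup (((PySem.Str.split₀ p.2).map pvClean).map (pvCat ds us)),
      c' ∈ pvCats4 := by
  intro c' hc'
  rw [PySem.List.dedup_eq_ofList] at hc'
  rcases List.mem_map.mp ((PySem.Set.mem_ofList _ _).mp hc') with ⟨w', _, rfl⟩
  exact pvCat_mem_cats4 ds us w'

theorem pvChunk_keys_nodup (ds us : List String) (p : Int × String) :
    ((pvChunk ds us p).map (·.1)).Nodup := by
  unfold pvChunk
  rw [List.map_map]
  refine List.Nodup.map_on ?_ ?_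
  · intro x hx y hy hxy
    exact (pvKey_inj (pvChunk_cats ds us p x hx) (pvChunk_cats ds us p y hy) hxy).1
  · rw [PySem.List.dedup_eq_ofList]; exact PySem.Set.nodup_ofList _

theorem pvChunk_key_shape (ds us : List String) (p : Int × String) (k : String)
    (hk : k ∈ (pvChunk ds us p).map (·.1)) :
    ∃ c ∈ pvCats4, k = pvKey c p.1 := by
  unfold pvChunk at hk
  rw [List.map_map] at hk
  rcases List.mem_map.mp hk with ⟨c', hc', rfl⟩
  exact ⟨c', pvChunk_cats ds us p c' hc', rfl⟩

-- A's whole double loop flattens to one entry list over the enumerated strings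
theorem pvOuterA (ds us : List String) (raw : List String) :
    ∀ (d : PySem.Dict String String) (n : Int), 1 ≤ n →
    d.keys.Nodup →
    (∀ k ∈ d.keys, ∃ c ∈ pvCats4, ∃ j : Int, 1 ≤ j ∧ j < n ∧ k = pvKey c j) →
    (raw.foldl (fun (st : PySem.Dict String String × Int) s =>
        ((PySem.Str.split₀ s).foldl (pvStepA ds us st.2) st.1, st.2 + 1)) (d, n)).1.items
      = d.items ++ (PySem.List.enumerate raw n).flatMap (pvChunk ds us) := by
  induction raw with
  | nil => intro d n _ _ _; simp [PySem.List.enumerate_nil]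
  | cons s raw ih =>
    intro d n hn hnd hshape
    have hfresh : ∀ c ∈ pvCats4, pvKey c n ∉ d.keys := by
      intro c hc hmm
      obtain ⟨c', hc', j, hj1, hjn, he⟩ := hshape _ hmm
      have := pvKey_inj hc hc' he
      have := pvToStr_inj hn hj1 this.2
      omega
    set words := (PySem.Str.split₀ s).map pvClean with hwords
    have hfun : pvStepA ds us n = fun a b => pvGenStep ds us n a (pvClean b) :=
      funext fun a => funext fun b => pvStepA_eq ds us n a b
    have hA : ((PySem.Str.split₀ s).foldl (pvStepA ds us n) d).items
        = d.items ++ pvChunk ds us (n, s) := by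
      rw [hfun, ← List.foldl_map (f := pvClean), ← hwords]
      exact pvFoldG_items ds us n words d hnd hfresh
    have hkeys1 : ((PySem.Str.split₀ s).foldl (pvStepA ds us n) d).keys
        = d.keys ++ (pvChunk ds us (n, s)).map (·.1) := by
      simp only [PySem.Dict.keys, hA, List.map_append]
    have hshape1 : ∀ k ∈ ((PySem.Str.split₀ s).foldl (pvStepA ds us n) d).keys,
        ∃ c ∈ pvCats4, ∃ j : Int, 1 ≤ j ∧ j < n + 1 ∧ k = pvKey c j := by
      intro k hk
      rw [hkeys1] at hk
      rcases List.mem_append.mp hk with hk | hk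
      · obtain ⟨c, hc, j, hj1, hjn, he⟩ := hshape _ hk
        exact ⟨c, hc, j, hj1, by omega, he⟩
      · obtain ⟨c, hc, he⟩ := pvChunk_key_shape ds us (n, s) k hk
        exact ⟨c, hc, n, hn, by omega, he⟩
    have hnd1 : ((PySem.Str.split₀ s).foldl (pvStepA ds us n) d).keys.Nodup := by
      rw [hkeys1]
      refine List.Nodup.append hnd (pvChunk_keys_nodup ds us (n, s)) ?_
      intro a ha hb
      obtain ⟨c, hc, rfl⟩ := pvChunk_key_shape ds us (n, s) a hb
      exact hfresh c hc ha
    rw [PySem.List.enumerate_cons, List.flatMap_cons, List.foldl_cons]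
    have := ih ((PySem.Str.split₀ s).foldl (pvStepA ds us n) d) (n + 1) (by omega) hnd1 hshape1
    simp only at this ⊢
    rw [this, hA, List.append_assoc]

-- the keys of B's flat pair list are pairwise distinct
theorem pvFlatKeyShape (ds us : List String) (raw : List String) (n : Int) (k : String)
    (hk : k ∈ ((PySem.List.enumerate raw n).flatMap (pvChunk ds us)).map (·.1)) :
    ∃ c ∈ pvCats4, ∃ j : Int, n ≤ j ∧ k = pvKey c j := by
  rw [List.map_flatMap] at hk
  rcases List.mem_flatMap.mp hk with ⟨p, hp, hkp⟩
  rcases (PySem.List.mem_enumerate_iff _ _ _).mp hp with ⟨i, hi, rfl⟩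
  obtain ⟨c, hc, he⟩ := pvChunk_key_shape ds us _ k hkp
  exact ⟨c, hc, n + i, by omega, he⟩

theorem pvFlatKeysNodup (ds us : List String) (raw : List String) :
    ∀ n : Int, 1 ≤ n →
    (((PySem.List.enumerate raw n).flatMap (pvChunk ds us)).map (·.1)).Nodup := by
  induction raw with
  | nil => intro n _; simp [PySem.List.enumerate_nil]
  | cons s raw ih =>
    intro n hn
    rw [PySem.List.enumerate_cons, List.flatMap_cons, List.map_append]
    refine List.Nodup.append (pvChunk_keys_nodup ds us (n, s)) (ih (n + 1) (by omega)) ?_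
    intro a ha hb
    obtain ⟨c, hc, rfl⟩ := pvChunk_key_shape ds us (n, s) a ha
    obtain ⟨c', hc', j, hj, he⟩ := pvFlatKeyShape ds us raw (n + 1) _ hb
    have h1 := pvKey_inj hc hc' he
    have := pvToStr_inj hn (by omega) h1.2
    omega

theorem ingredients_extracter_spec : Claim_equal_ingredients_extracter := by
  intro ingredient_raw_dict descriptor units _hdom hpre
  show ingredients_extracter ingredient_raw_dict descriptor units
      = ingredients_extracter_alt ingredient_raw_dict descriptor units
  unfold ingredients_extracter ingredients_extracter_alt
  cases hfind : ingredient_raw_dict.find? (fun p => p.1 == "ingredients") with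
  | none =>
    exfalso
    rcases List.mem_map.mp hpre with ⟨p, hp, hfst⟩
    have := List.find?_eq_none.mp hfind p hp
    simp [hfst] at this
  | some pr =>
    dsimp only
    -- B's tagged list, rewritten through pvGroup_eq into the shared chunk shape
    have hpairs : (PySem.List.enumerate pr.2 1).flatMap
          (fun p => pvGroup p.1
            ((PySem.Str.split₀ p.2).map (fun w0 =>
              let w := pvClean w0; (w, pvCat descriptor units w))))
        = (PySem.List.enumerate pr.2 1).flatMap (pvChunk descriptor units) := by
      refine congrArg (List.flatMap · (PySem.List.enumerate pr.2 1)) (funext fun p => ?_)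
      have hm : (PySem.Str.split₀ p.2).map (fun w0 =>
            let w := pvClean w0; (w, pvCat descriptor units w))
          = ((PySem.Str.split₀ p.2).map pvClean).map
              (fun w => (w, pvCat descriptor units w)) := by
        rw [List.map_map]; rfl
      rw [hm, pvGroup_eq]
      rfl
    rw [hpairs]
    -- B: inserting a fresh-keyed pair list into an empty dict returns it unchanged
    have hB := PySem.Dict.items_foldl_insert_fresh
      ((PySem.List.enumerate pr.2 1).flatMap (pvChunk descriptor units))
      (·.1) (·.2) PySem.Dict.empty
      (fun a _ => PySem.Dict.contains_empty _)
      (pvFlatKeysNodup descriptor units pr.2 1 (by omega))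
    simp only at hB
    rw [hB]
    -- A: the flattened double loop gives the same list
    rw [pvOuterA descriptor units pr.2 PySem.Dict.empty 1 (by omega)
      (by simp [PySem.Dict.keys_empty])
      (by simp [PySem.Dict.keys_empty])]
    simp
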